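-- pv_equiv track=rewrite | github.com/yannistrimis/my_code | rk_study/rk_taylor_funcs_1.py | delete_blanks
-- ===== SOURCE A (Python) =====
-- def delete_blanks(a):
--
--     length=0
--     for i in range(len(a)):
--
--         if a[i]=='':
--             break
--         length=length+1
--
--     a_2=['']*length
--
--     for i in range(length):
--         a_2[i]=a[i]
--
--     return a_2
-- ===== SOURCE B (Python) =====
-- def delete_blanks(a):
--     # Single pass: accumulate elements, stopping at the first ''.
--     out = []
--     for x in a:
--         if x == '':
--             break
--         out.append(x)
--     return out
-- ===== Notes on version B (the rewrite author's own statement) =====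
-- stated objective: simpler
-- what changed: Replaces A's two staged passes (a counting loop with break, then a pre-sized buffer filled by an index copy loop) with a single pass that accumulates elements and breaks at the first empty string.
import Mathlib
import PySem

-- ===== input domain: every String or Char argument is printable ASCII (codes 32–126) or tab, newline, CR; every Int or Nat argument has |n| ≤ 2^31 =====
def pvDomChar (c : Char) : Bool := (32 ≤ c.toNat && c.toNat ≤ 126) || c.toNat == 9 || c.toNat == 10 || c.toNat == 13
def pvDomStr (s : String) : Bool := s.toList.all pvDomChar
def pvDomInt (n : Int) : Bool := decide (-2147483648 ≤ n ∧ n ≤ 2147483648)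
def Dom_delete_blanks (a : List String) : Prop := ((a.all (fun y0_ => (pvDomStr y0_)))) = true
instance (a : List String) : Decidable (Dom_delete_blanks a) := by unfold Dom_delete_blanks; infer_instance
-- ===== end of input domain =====

-- B replaces A's two staged passes (count-until-blank, then buffer copy) with a single accumulate-and-break pass (simpler).

-- ===== PORT A =====
-- first loop of A: count elements until the first '' (break)
def delete_blanks_len : List String → Nat
  | [] => 0
  | x :: xs => if x = "" then 0 else delete_blanks_len xs + 1

def delete_blanks (a : List String) : List String :=
  let length := delete_blanks_len a
  let a_2 := List.replicate length ""
  (List.range length).foldl (fun acc i => acc.set i (a.getD i "")) a_2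

-- ===== PORT B =====
-- B's for-loop with break, transliterated: 'out' is the accumulator; break returns it.
def delete_blanks_alt_go : List String → List String → List String
  | [], out => out
  | x :: xs, out => if x = "" then out else delete_blanks_alt_go xs (out ++ [x])

def delete_blanks_alt (a : List String) : List String := delete_blanks_alt_go a []

-- ===== PRECONDITION & SPEC =====
def Spec_delete_blanks (a : List String) (out : List String) : Prop := out = delete_blanks_alt a
instance (a : List String) (out : List String) : Decidable (Spec_delete_blanks a out) := by unfold Spec_delete_blanks; infer_instance

-- ===== CLAIM (what is proved, stated in full; the proofs are below) =====
def Claim_equal_delete_blanks : Prop := ∀ (a : List String), Dom_delete_blanks a → Spec_delete_blanks a (delete_blanks a)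

-- ===== LEMMAS AND PROOFS =====
theorem delete_blanks_len_le (a : List String) : delete_blanks_len a ≤ a.length := by
  induction a with
  | nil => simp [delete_blanks_len]
  | cons x xs ih =>
    simp only [delete_blanks_len, List.length_cons]
    split <;> omega

theorem delete_blanks_fold_set (a b : List String) (n : Nat)
    (ha : n ≤ a.length) (hb : n ≤ b.length) :
    (List.range n).foldl (fun acc i => acc.set i (a.getD i "")) b =
      a.take n ++ b.drop n := by
  induction n with
  | zero => simp
  | succ m ih =>
    rw [List.range_succ, List.foldl_append, ih (by omega) (by omega)]
    simp only [List.foldl_cons, List.foldl_nil]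
    have hma : m < a.length := by omega
    have hmb : m < b.length := by omega
    have hlen : (a.take m).length = m := by simp [Nat.min_eq_left (le_of_lt hma)]
    have hdrop : b.drop m = b[m] :: b.drop (m + 1) := (List.drop_eq_getElem_cons hmb)
    rw [hdrop, List.set_append_right _ _ (by omega), hlen]
    simp only [Nat.sub_self, List.set_cons_zero]
    have : a.take (m + 1) = a.take m ++ [a[m]] := by
      rw [List.take_add_one]
      simp [List.getElem?_eq_getElem hma]
    rw [List.getD_eq_getElem a "" hma, this, List.append_assoc]
    simp

theorem delete_blanks_eq_take (a : List String) :
    delete_blanks a = a.take (delete_blanks_len a) := by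
  unfold delete_blanks
  rw [delete_blanks_fold_set a _ _ (delete_blanks_len_le a) (by simp)]
  simp

theorem delete_blanks_alt_go_eq (a : List String) : ∀ out,
    delete_blanks_alt_go a out = out ++ a.take (delete_blanks_len a) := by
  induction a with
  | nil => intro out; simp [delete_blanks_alt_go, delete_blanks_len]
  | cons x xs ih =>
    intro out
    by_cases hx : x = ""
    · simp [delete_blanks_alt_go, delete_blanks_len, hx]
    · simp [delete_blanks_alt_go, delete_blanks_len, hx, ih]

theorem delete_blanks_alt_eq_take (a : List String) :
    delete_blanks_alt a = a.take (delete_blanks_len a) := by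
  simp [delete_blanks_alt, delete_blanks_alt_go_eq]

-- ===== VERDICT (by name: the statement is the Claim_ definition above) =====
theorem delete_blanks_spec : Claim_equal_delete_blanks := by
  intro a _
  unfold Spec_delete_blanks
  rw [delete_blanks_eq_take, delete_blanks_alt_eq_take]
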